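-- pv_equiv track=rewrite | github.com/kamsahn/sam-learns | dataannotation/coding_qual.py | assemble_code
-- ===== SOURCE A (Python) =====
-- def assemble_code(lines: list[str]) -> str:
--     secret_code = ""
--     step = 1
--     while len(lines) > 0 and len(lines) >= step:
--         sub_lines = lines[:step]
--         secret_code += f"{sub_lines[-1]} "
--         lines = lines[step:]
--         step += 1
--
--     return secret_code[:-1]  # remove the trailing space
-- ===== SOURCE B (Python) =====
-- def assemble_code(lines: list[str]) -> str:
--     # Pick elements at triangular-number positions directly, no list slicing.
--     out = []
--     k = 1
--     t = 1  # t = k*(k+1)//2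
--     n = len(lines)
--     while t <= n:
--         out.append(lines[t - 1])
--         k += 1
--         t += k
--     return " ".join(out)
-- ===== Notes on version B (the rewrite author's own statement) =====
-- stated objective: faster
-- what changed: Instead of repeatedly slicing the list into growing chunks and concatenating strings with a trailing space, B indexes the triangular-number positions k(k+1)/2-1 directly and joins the picked elements once.
import Mathlib
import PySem

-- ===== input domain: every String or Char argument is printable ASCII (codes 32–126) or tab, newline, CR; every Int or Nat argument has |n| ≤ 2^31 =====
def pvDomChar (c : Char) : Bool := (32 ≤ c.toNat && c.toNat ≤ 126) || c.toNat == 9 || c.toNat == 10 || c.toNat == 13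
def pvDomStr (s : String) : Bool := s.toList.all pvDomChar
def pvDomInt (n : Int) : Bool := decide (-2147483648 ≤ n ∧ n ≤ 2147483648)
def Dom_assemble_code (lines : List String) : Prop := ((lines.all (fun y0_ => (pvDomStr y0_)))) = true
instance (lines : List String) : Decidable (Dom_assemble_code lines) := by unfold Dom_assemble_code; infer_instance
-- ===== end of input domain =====

-- B picks the triangular-number positions directly instead of repeatedly slicing; objective: faster (asymptotic).

-- ===== PORT A =====
-- A's while loop; Python's `step` starts at 1 and only ever increments, so we carry s = step - 1 : Nat.
-- `sub_lines[-1]` is `(lines.take step).getLastD ""`: exact, since under the loop condition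
-- `len(lines) >= step >= 1` the chunk is nonempty, so Python's negative index never raises.
def assembleLoop (lines : List String) (s : Nat) (acc : String) : String :=
  if 0 < lines.length ∧ s + 1 ≤ lines.length then
    assembleLoop (lines.drop (s + 1)) (s + 1) (acc ++ (lines.take (s + 1)).getLastD "" ++ " ")
  else acc
termination_by lines.length
decreasing_by simp_all

-- `secret_code[:-1]` drops the final character (and leaves "" unchanged): exactly `dropLast` on the characters.
def assemble_code (lines : List String) : String :=
  String.ofList (assembleLoop lines 0 "").toList.dropLast

-- ===== PORT B =====
-- hand-written port of `" ".join(out)`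
def joinSpace : List String → String
  | [] => ""
  | [x] => x
  | x :: xs => x ++ " " ++ joinSpace xs

-- B's while loop: `t` is the running triangular number k(k+1)/2; `lines[t-1]` is in range whenever
-- the loop runs (t ≥ 1 there), ported as `getD (t-1) ""`.
def pickTris (lines : List String) (k t : Nat) : List String :=
  if t ≤ lines.length then
    lines.getD (t - 1) "" :: pickTris lines (k + 1) (t + k + 1)
  else []
termination_by lines.length + 1 - t
decreasing_by simp_all; omega

def assemble_code_alt (lines : List String) : String :=
  joinSpace (pickTris lines 1 1)

-- ===== PRECONDITION & SPEC =====
def Spec_assemble_code (lines : List String) (out : String) : Prop := out = assemble_code_alt lines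
instance (lines : List String) (out : String) : Decidable (Spec_assemble_code lines out) := by unfold Spec_assemble_code; infer_instance

-- ===== CLAIM (what is proved, stated in full; the proofs are below) =====
def Claim_equal_assemble_code : Prop := ∀ (lines : List String), Dom_assemble_code lines → Spec_assemble_code lines (assemble_code lines)

-- ===== LEMMAS AND PROOFS =====

-- the concatenation A's loop builds: every picked element followed by a space
def trail : List String → String
  | [] => ""
  | x :: xs => x ++ " " ++ trail xs

-- joining with spaces = build "x1 x2 ... xn " and drop the final space
theorem joinSpace_eq_trail (l : List String) :
    joinSpace l = String.ofList (trail l).toList.dropLast := by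
  induction l with
  | nil => decide
  | cons x xs ih =>
    cases xs with
    | nil => simp [joinSpace, trail, String.ofList_toList]
    | cons y l =>
      simp only [joinSpace, trail] at ih ⊢
      rw [ih]
      simp only [String.ext_iff, String.toList_append, String.toList_ofList]
      conv_rhs => rw [List.dropLast_append_of_ne_nil (by simp)]

theorem take_drop_getLastD (lines : List String) (d s : Nat) (h : d + s + 1 ≤ lines.length) :
    ((lines.drop d).take (s + 1)).getLastD "" = lines.getD (d + s) "" := by
  have hlen : ((lines.drop d).take (s + 1)).length = s + 1 := by
    simp [List.length_take, List.length_drop]; omega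
  rw [List.getLastD_eq_getLast?, List.getLast?_eq_getElem?, hlen]
  simp only [Nat.add_sub_cancel]
  rw [List.getElem?_take_of_lt (by omega), List.getElem?_drop, List.getD_eq_getElem?_getD]

-- A's loop, started on `lines.drop d` with step s+1 and accumulator acc, produces
-- acc followed by the trail of B's picks starting at triangular index d+s+1.
theorem loop_eq (lines : List String) :
    ∀ m d s acc, lines.length ≤ d + m →
      assembleLoop (lines.drop d) s acc = acc ++ trail (pickTris lines (s + 1) (d + s + 1)) := by
  intro m
  induction m with
  | zero =>
    intro d s acc h
    rw [assembleLoop.eq_def, pickTris.eq_def]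
    simp only [List.length_drop]
    rw [if_neg (by omega), if_neg (by omega)]
    simp [trail]
  | succ m ih =>
    intro d s acc h
    rw [assembleLoop.eq_def, pickTris.eq_def]
    simp only [List.length_drop]
    by_cases hc : d + s + 1 ≤ lines.length
    · rw [if_pos (by omega), if_pos hc]
      rw [List.drop_drop, take_drop_getLastD lines d s hc]
      have hrec := ih (d + (s + 1)) (s + 1) (acc ++ lines.getD (d + s) "" ++ " ") (by omega)
      have h1 : d + (s + 1) + (s + 1) + 1 = d + s + 1 + (s + 1) + 1 := by omega
      rw [h1] at hrec
      rw [hrec]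
      have h2 : d + s + 1 - 1 = d + s := by omega
      rw [h2]
      simp [trail, String.append_assoc]
    · rw [if_neg (by omega), if_neg hc]
      simp [trail]

-- ===== VERDICT (by name: the statement is the Claim_ definition above) =====
theorem assemble_code_spec : Claim_equal_assemble_code := by
  intro lines _
  unfold Spec_assemble_code assemble_code assemble_code_alt
  have h := loop_eq lines lines.length 0 0 "" (by omega)
  simp only [List.drop_zero] at h
  rw [h, joinSpace_eq_trail]
  simp
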